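-- pv_equiv track=rewrite | github.com/SergioQS/Computer_Science | Intro_CC/Python/Ejercicios_Funciones.py | num_positivos
-- ===== SOURCE A (Python) =====
-- def num_positivos(lista,p,r):
--
--     if p == r:
--         if lista[p] >= 0:
--             return 1
--         if lista[p] < 0:
--             return 0
--     q = ((p+r)//2)
--     suma = num_positivos(lista,p,q)
--     suma += num_positivos(lista,q+1,r)
--     return suma
-- ===== SOURCE B (Python) =====
-- def num_positivos(lista, p, r):
--     count = 0
--     for i in range(p, r + 1):
--         if lista[i] >= 0:
--             count += 1
--     return count
-- ===== Notes on version B (the rewrite author's own statement) =====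
-- stated objective: simpler
-- what changed: Replaces A's divide-and-conquer recursion (split at the floor midpoint, add the two halves) with a single iterative pass keeping a running counter over range(p, r+1).
import Mathlib
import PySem

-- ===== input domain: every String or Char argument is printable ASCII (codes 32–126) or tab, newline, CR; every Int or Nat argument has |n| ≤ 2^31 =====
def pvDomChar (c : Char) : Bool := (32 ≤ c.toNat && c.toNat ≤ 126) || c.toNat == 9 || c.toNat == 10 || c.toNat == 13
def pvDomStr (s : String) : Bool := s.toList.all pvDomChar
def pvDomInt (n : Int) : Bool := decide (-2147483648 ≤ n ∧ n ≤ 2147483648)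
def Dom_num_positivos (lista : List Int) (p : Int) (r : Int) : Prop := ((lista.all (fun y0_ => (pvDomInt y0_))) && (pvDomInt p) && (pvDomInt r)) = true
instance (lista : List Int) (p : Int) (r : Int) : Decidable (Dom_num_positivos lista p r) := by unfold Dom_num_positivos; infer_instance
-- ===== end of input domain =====

-- B replaces A's midpoint-splitting recursion by one iterative counting pass; same result on Pre_.

-- ===== PORT A =====
-- A's recursion diverges when p > r, so the port carries explicit fuel, (r-p).toNat + 1,
-- which is enough for every input admitted by Pre_ (the interval shrinks strictly on each split).
-- On fuel 0 / IndexError (both excluded by Pre_) it returns 0.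
-- A's base case 'if lista[p] >= 0 … if lista[p] < 0 …' is exhaustive for integers, ported as if/else.
def numA_go (lista : List Int) : Nat → Int → Int → Int
  | 0, _, _ => 0
  | fuel + 1, p, r =>
    if p = r then
      match PySem.List.pyGet? lista p with
      | some v => if v ≥ 0 then 1 else 0
      | none => 0
    else
      let q := PySem.Int.floordiv (p + r) 2
      numA_go lista fuel p q + numA_go lista fuel (q + 1) r

def num_positivos (lista : List Int) (p : Int) (r : Int) : Int :=
  numA_go lista ((r - p).toNat + 1) p r

-- ===== PORT B =====
-- count = 0; for i in range(p, r+1): if lista[i] >= 0: count += 1; return count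
-- (the 'none' branch is the IndexError case, excluded by Pre_)
def num_positivos_alt (lista : List Int) (p : Int) (r : Int) : Int :=
  (PySem.List.pyRange p (r + 1) 1).foldl
    (fun count i =>
      match PySem.List.pyGet? lista i with
      | some v => if v ≥ 0 then count + 1 else count
      | none => count) 0

-- ===== PRECONDITION & SPEC =====
-- Pre_ excludes p > r (A recurses forever: RecursionError) and indices outside
-- Python's valid range -len ≤ i < len (A raises IndexError at a base case).
def Pre_num_positivos (lista : List Int) (p : Int) (r : Int) : Prop :=
  p ≤ r ∧ PySem.Raise.InRange lista.length p ∧ PySem.Raise.InRange lista.length r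

instance (lista : List Int) (p : Int) (r : Int) : Decidable (Pre_num_positivos lista p r) := by
  unfold Pre_num_positivos; infer_instance

def pvWitness_num_positivos : List Int × Int × Int := ([1, -2, 3], 0, 2)

def Spec_num_positivos (lista : List Int) (p : Int) (r : Int) (out : Int) : Prop := out = num_positivos_alt lista p r
instance (lista : List Int) (p : Int) (r : Int) (out : Int) : Decidable (Spec_num_positivos lista p r out) := by unfold Spec_num_positivos; infer_instance

-- ===== CLAIM (what is proved, stated in full; the proofs are below) =====
def Claim_equal_num_positivos : Prop := ∀ (lista : List Int) (p : Int) (r : Int), Dom_num_positivos lista p r → Pre_num_positivos lista p r → Spec_num_positivos lista p r (num_positivos lista p r)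

-- ===== LEMMAS AND PROOFS =====

-- B's loop body shifts its accumulator additively.
theorem numB_foldl_shift (lista : List Int) (l : List Int) (c : Int) :
    l.foldl (fun count i =>
      match PySem.List.pyGet? lista i with
      | some v => if v ≥ 0 then count + 1 else count
      | none => count) c
    = c + l.foldl (fun count i =>
      match PySem.List.pyGet? lista i with
      | some v => if v ≥ 0 then count + 1 else count
      | none => count) 0 := by
  induction l generalizing c with
  | nil => simp
  | cons x xs ih =>
    simp only [List.foldl_cons]
    rw [ih, ih (match PySem.List.pyGet? lista x with
      | some v => if v ≥ 0 then (0:Int) + 1 else 0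
      | none => 0)]
    cases PySem.List.pyGet? lista x with
    | none => simp
    | some v =>
      by_cases h : v ≥ 0
      · simp only [h, if_true]
        rw [ih]
        ring
      · simp [h]

-- B counts additively over a split of the index range.
theorem numB_split (lista : List Int) (p m r : Int) (h1 : p ≤ m) (h2 : m ≤ r) :
    num_positivos_alt lista p r
    = num_positivos_alt lista p m + num_positivos_alt lista (m + 1) r := by
  unfold num_positivos_alt
  rw [PySem.List.pyRange_one_append p (m + 1) (r + 1) (by omega) (by omega),
    List.foldl_append, numB_foldl_shift]

-- main invariant: with enough fuel, A's recursion equals B's count on any valid subinterval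
theorem numA_eq_numB (lista : List Int) (fuel : Nat) (p r : Int)
    (hpr : p ≤ r) (hfuel : (r - p).toNat < fuel)
    (hlo : -(lista.length : Int) ≤ p) (hhi : r < lista.length) :
    numA_go lista fuel p r = num_positivos_alt lista p r := by
  induction fuel generalizing p r with
  | zero => omega
  | succ fuel ih =>
    by_cases hbase : p = r
    · subst hbase
      have hin : PySem.Raise.InRange lista.length p := by
        simp [PySem.Raise.InRange]; omega
      obtain ⟨v, hv⟩ : ∃ v, PySem.List.pyGet? lista p = some v := by
        rcases h : PySem.List.pyGet? lista p with _ | v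
        · rw [PySem.List.pyGet?_eq_none_iff] at h; exact absurd hin h
        · exact ⟨v, rfl⟩
      unfold numA_go num_positivos_alt
      rw [PySem.List.pyRange_one_singleton]
      simp [hv]
    · have hlt : p < r := lt_of_le_of_ne hpr hbase
      have hq := PySem.Int.floordiv_two_mid_bounds hpr
      have hqr : PySem.Int.floordiv (p + r) 2 < r := by
        rw [PySem.Int.floordiv_lt_iff_lt_mul (by omega)]; omega
      set q := PySem.Int.floordiv (p + r) 2 with hqdef
      have h1 : numA_go lista (fuel + 1) p r = numA_go lista fuel p q + numA_go lista fuel (q + 1) r := by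
        rw [hqdef]; simp only [numA_go, if_neg hbase]
      rw [h1, ih p q hq.1 (by omega) hlo (by omega),
        ih (q + 1) r (by omega) (by omega) (by omega) hhi,
        numB_split lista p q r hq.1 hq.2]

-- ===== VERDICT (by name: the statement is the Claim_ definition above) =====
theorem num_positivos_spec : Claim_equal_num_positivos := by
  intro lista p r _ hpre
  obtain ⟨hpr, hp, hr⟩ := hpre
  simp [PySem.Raise.InRange] at hp hr
  unfold Spec_num_positivos num_positivos
  exact numA_eq_numB lista _ p r hpr (by omega) (by omega) (by omega)
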